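-- pv_equiv track=rewrite | github.com/WhiteMasky/nanobot | backup/skills/social_copywriting.py | generate_hashtags
-- ===== SOURCE A (Python) =====
-- def generate_hashtags(keywords, platform='xiaohongshu'):
--     """生成话题标签"""
--     if not keywords:
--         return ''
--
--     keyword_list = keywords.split(',') if ',' in keywords else [keywords]
--
--     if platform == 'xiaohongshu':
--         tags = [f'#{kw.strip()}#' for kw in keyword_list[:5]]
--         tags.extend(['#好物分享', '#种草', '#推荐'])
--         return ' '.join(tags)
--     elif platform == 'weibo':
--         tags = [f'#{kw.strip()}#' for kw in keyword_list[:3]]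
--         return ' '.join(tags)
--     elif platform == 'twitter':
--         tags = [f'#{kw.strip()}' for kw in keyword_list[:3]]
--         return ' '.join(tags)
--     elif platform == 'linkedin':
--         tags = [f'#{kw.strip()}' for kw in keyword_list[:3]]
--         return '\n' + ' '.join(tags)
--     else:
--         return ''
-- ===== SOURCE B (Python) =====
-- # B: one recursive emitter builds the joined string directly (separator-first),
-- # replacing A's staged list passes (slice -> map/format -> extend -> ' '.join).
--
-- def _emit_extras(extras, first):
--     if not extras:
--         return ''
--     sep = '' if first else ' '
--     return sep + extras[0] + _emit_extras(extras[1:], False)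
--
-- def _emit(kws, n, close, extras, first):
--     if n == 0 or not kws:
--         return _emit_extras(extras, first)
--     sep = '' if first else ' '
--     return sep + '#' + kws[0].strip() + close + _emit(kws[1:], n - 1, close, extras, False)
--
-- def generate_hashtags(keywords, platform='xiaohongshu'):
--     if not keywords:
--         return ''
--     kws = keywords.split(',') if ',' in keywords else [keywords]
--     if platform == 'xiaohongshu':
--         return _emit(kws, 5, '#', ['#好物分享', '#种草', '#推荐'], True)
--     if platform == 'weibo':
--         return _emit(kws, 3, '#', [], True)
--     if platform == 'twitter':
--         return _emit(kws, 3, '', [], True)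
--     if platform == 'linkedin':
--         return '\n' + _emit(kws, 3, '', [], True)
--     return ''
-- ===== Notes on version B (the rewrite author's own statement) =====
-- stated objective: alternative
-- what changed: A builds intermediate tag lists in stages (slice, format-map, extend, ' '.join); B never builds a tag list: a single recursive emitter walks the keywords with a countdown and writes the final string directly, separator-first, then recurses into the fixed extra tags.
import Mathlib
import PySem

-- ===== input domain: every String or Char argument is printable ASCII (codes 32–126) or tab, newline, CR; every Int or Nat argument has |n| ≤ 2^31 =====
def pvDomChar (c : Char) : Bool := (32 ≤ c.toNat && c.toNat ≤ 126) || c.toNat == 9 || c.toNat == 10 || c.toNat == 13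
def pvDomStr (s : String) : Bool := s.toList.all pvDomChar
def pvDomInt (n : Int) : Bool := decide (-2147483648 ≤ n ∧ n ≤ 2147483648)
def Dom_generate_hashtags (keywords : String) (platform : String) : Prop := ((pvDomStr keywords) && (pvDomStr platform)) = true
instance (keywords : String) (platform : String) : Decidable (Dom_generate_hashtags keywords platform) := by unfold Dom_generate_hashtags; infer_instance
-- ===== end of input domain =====

-- B replaces A's staged list passes (slice, format-map, extend, join) by one recursive
-- emitter that writes the joined string directly (objective: alternative).

-- ===== PORT A =====
def generate_hashtags (keywords : String) (platform : String) : String :=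
  if keywords = "" then ""
  else
    let keyword_list :=
      if PySem.Str.isIn "," keywords then (PySem.Str.split? keywords ",").getD [] else [keywords]
    if platform = "xiaohongshu" then
      let tags := (PySem.List.slice keyword_list none (some 5)).map
        (fun kw => "#" ++ PySem.Str.strip kw ++ "#")
      PySem.Str.join " " (tags ++ ["#好物分享", "#种草", "#推荐"])
    else if platform = "weibo" then
      let tags := (PySem.List.slice keyword_list none (some 3)).map
        (fun kw => "#" ++ PySem.Str.strip kw ++ "#")
      PySem.Str.join " " tags
    else if platform = "twitter" then
      let tags := (PySem.List.slice keyword_list none (some 3)).map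
        (fun kw => "#" ++ PySem.Str.strip kw)
      PySem.Str.join " " tags
    else if platform = "linkedin" then
      let tags := (PySem.List.slice keyword_list none (some 3)).map
        (fun kw => "#" ++ PySem.Str.strip kw)
      "\n" ++ PySem.Str.join " " tags
    else ""

-- ===== PORT B =====
def emitExtras : List String → Bool → String
  | [], _ => ""
  | e :: rest, first => (if first then "" else " ") ++ e ++ emitExtras rest false

def emitTags (close : String) (extras : List String) : List String → Nat → Bool → String
  | _, 0, first => emitExtras extras first
  | [], _ + 1, first => emitExtras extras first
  | kw :: rest, n + 1, first =>
      (if first then "" else " ") ++ "#" ++ PySem.Str.strip kw ++ close ++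
        emitTags close extras rest n false

def generate_hashtags_alt (keywords : String) (platform : String) : String :=
  if keywords = "" then ""
  else
    let kws :=
      if PySem.Str.isIn "," keywords then (PySem.Str.split? keywords ",").getD [] else [keywords]
    if platform = "xiaohongshu" then
      emitTags "#" ["#好物分享", "#种草", "#推荐"] kws 5 true
    else if platform = "weibo" then
      emitTags "#" [] kws 3 true
    else if platform = "twitter" then
      emitTags "" [] kws 3 true
    else if platform = "linkedin" then
      "\n" ++ emitTags "" [] kws 3 true
    else ""

-- ===== PRECONDITION & SPEC =====
def Spec_generate_hashtags (keywords : String) (platform : String) (out : String) : Prop := out = generate_hashtags_alt keywords platform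
instance (keywords : String) (platform : String) (out : String) : Decidable (Spec_generate_hashtags keywords platform out) := by unfold Spec_generate_hashtags; infer_instance

-- ===== CLAIM =====
def Claim_equal_generate_hashtags : Prop := ∀ (keywords : String) (platform : String), Dom_generate_hashtags keywords platform → Spec_generate_hashtags keywords platform (generate_hashtags keywords platform)

-- ===== LEMMAS AND PROOFS =====

-- join " " (t :: es) peels off one separator-first step of emitExtras.
theorem join_cons (t : String) (es : List String) :
    PySem.Str.join " " (t :: es) = t ++ emitExtras es false := by
  induction es generalizing t with
  | nil =>
    apply String.toList_inj.mp
    simp [PySem.Str.toList_join, PySem.Chars.join, emitExtras, List.intercalate]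
  | cons e rest ih =>
    apply String.toList_inj.mp
    have h := congrArg String.toList (ih e)
    simp only [PySem.Str.toList_join, PySem.Chars.join, String.toList_append] at h ⊢
    simp only [List.map_cons, List.intercalate] at h ⊢
    have h' : (List.intersperse [' '] (e.toList :: List.map String.toList rest)).flatten =
        e.toList ++ (emitExtras rest false).toList := by simpa using h
    simp [List.intersperse, emitExtras, h']

theorem emitExtras_true (es : List String) :
    emitExtras es true = PySem.Str.join " " es := by
  cases es with
  | nil =>
    apply String.toList_inj.mp
    simp [PySem.Str.toList_join, PySem.Chars.join, emitExtras, List.intercalate]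
  | cons e rest =>
    rw [join_cons]
    simp [emitExtras]

-- The emitter written out as "emitExtras over the fully formatted list".
theorem emitTags_eq (close : String) (extras : List String) (kws : List String)
    (n : Nat) (first : Bool) :
    emitTags close extras kws n first =
      emitExtras ((kws.take n).map (fun kw => "#" ++ PySem.Str.strip kw ++ close) ++ extras) first := by
  induction kws generalizing n first with
  | nil => cases n <;> simp [emitTags]
  | cons kw rest ih =>
    cases n with
    | zero => simp [emitTags]
    | succ m =>
      simp [emitTags, emitExtras, ih, String.append_assoc]

theorem emitTags_join (close : String) (extras : List String) (kws : List String) (n : Nat) :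
    emitTags close extras kws n true =
      PySem.Str.join " " ((kws.take n).map (fun kw => "#" ++ PySem.Str.strip kw ++ close) ++ extras) := by
  rw [emitTags_eq, emitExtras_true]

-- ===== VERDICT =====
theorem generate_hashtags_spec : Claim_equal_generate_hashtags := by
  intro keywords platform _
  unfold Spec_generate_hashtags generate_hashtags generate_hashtags_alt
  by_cases hk : keywords = "" <;> simp only [hk, if_true, if_false]
  have h5 : ∀ xs : List String, PySem.List.slice xs none (some 5) = xs.take 5 :=
    fun xs => by rw [PySem.List.slice_to xs (b := 5) (by norm_num)]; rfl
  have h3 : ∀ xs : List String, PySem.List.slice xs none (some 3) = xs.take 3 :=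
    fun xs => by rw [PySem.List.slice_to xs (b := 3) (by norm_num)]; rfl
  by_cases h1 : platform = "xiaohongshu"
  · simp [h1, emitTags_join, h5]
  by_cases h2 : platform = "weibo"
  · simp [h2, emitTags_join, h3]
  by_cases ht : platform = "twitter"
  · simp [ht, emitTags_join, h3]
  by_cases hl : platform = "linkedin"
  · simp [hl, emitTags_join, h3]
  · simp [h1, h2, ht, hl]
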